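-- pv_equiv track=rewrite | github.com/BrewingWeasel/anteater | scripts/circlegeneration.py | fill_inside
-- ===== SOURCE A (Python) =====
-- def fill_inside(conts):
--     for y_index, line in enumerate(conts):
--         if y_index == 0 or y_index == len(conts) - 1:
--             continue
--         begun = False
--         lastAsterisk = True
--         for x_index, x in enumerate(line):
--             if x == " " and begun:
--                 conts[y_index][x_index] = "*"
--             if x == "*":
--                 if begun:
--                     if not lastAsterisk:
--                         break
--                 begun = True
--                 lastAsterisk = True
--             else:
--                 lastAsterisk = False
--     return conts
-- ===== SOURCE B (Python) =====
-- def fill_inside(conts):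
--     for y in range(1, len(conts) - 1):
--         line = conts[y]
--         if "*" not in line:
--             continue
--         left = line.index("*")
--         boundary = len(line)
--         for i in range(left + 1, len(line)):
--             if line[i] == "*" and line[i - 1] != "*":
--                 boundary = i
--                 break
--         for i in range(left + 1, boundary):
--             if line[i] == " ":
--                 line[i] = "*"
--     return conts
-- ===== Notes on version B (the rewrite author's own statement) =====
-- stated objective: simpler
-- what changed: Replaces A's single stateful scan with begun/lastAsterisk flags by a three-step decomposition per row: locate the first '*', compute the fill boundary (first '*' not preceded by '*'), then fill the spaces in that range.
import Mathlib
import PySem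

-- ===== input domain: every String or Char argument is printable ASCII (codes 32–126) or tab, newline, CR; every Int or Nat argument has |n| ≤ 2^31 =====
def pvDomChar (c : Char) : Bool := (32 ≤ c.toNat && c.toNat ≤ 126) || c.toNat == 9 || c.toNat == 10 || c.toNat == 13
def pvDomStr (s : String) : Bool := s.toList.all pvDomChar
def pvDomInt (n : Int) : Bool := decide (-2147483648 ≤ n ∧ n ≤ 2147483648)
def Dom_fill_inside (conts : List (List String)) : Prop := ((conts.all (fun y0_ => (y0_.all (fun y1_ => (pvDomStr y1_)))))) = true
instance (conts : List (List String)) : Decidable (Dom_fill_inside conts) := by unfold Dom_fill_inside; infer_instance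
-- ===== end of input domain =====

-- B replaces A's single stateful row scan (begun/lastAsterisk flags) by a per-row decomposition:
-- find the first '*', compute the fill boundary, then fill the spaces in between (objective: simpler).
-- Both Pythons mutate `conts` in place; the equivalence proved here is about the returned value.

-- ===== PORT A =====
-- inner loop of A: j is the enumerate counter, `suffix` the part of the row still to scan,
-- `acc` the row being updated in place; the break returns acc.
def fillRowA_go (acc : List String) (j : Nat) (suffix : List String) (begun lastA : Bool) : List String :=
  match suffix with
  | [] => acc
  | x :: rest =>
    let acc' := if x == " " && begun then acc.set j "*" else acc
    if x == "*" then
      if begun && !lastA then acc'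
      else fillRowA_go acc' (j+1) rest true true
    else fillRowA_go acc' (j+1) rest begun false

-- outer loop of A: `n` = len(conts), `j` the enumerate counter (rows are updated independently)
def fill_inside_go (n : Nat) (j : Nat) (rows : List (List String)) : List (List String) :=
  match rows with
  | [] => []
  | row :: rest =>
    (if j == 0 || j == n - 1 then row else fillRowA_go row 0 row false true)
      :: fill_inside_go n (j+1) rest

def fill_inside (conts : List (List String)) : List (List String) :=
  fill_inside_go conts.length 0 conts

-- ===== PORT B =====
-- boundary scan of B: first i in idxs with row[i]=='*' and row[i-1]!='*', else len(row)
def findBoundaryB (row : List String) (idxs : List Nat) : Nat :=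
  match idxs with
  | [] => row.length
  | i :: rest =>
    if row.getD i "" == "*" && row.getD (i-1) "" != "*" then i
    else findBoundaryB row rest

-- one interior row of B: locate the first '*', compute the boundary, fill the spaces between
def fillRowB (row : List String) : List String :=
  match PySem.List.index? row "*" with
  | none => row
  | some left =>
    let boundary := findBoundaryB row (List.range' (left+1) (row.length - (left+1)))
    (List.range' (left+1) (boundary - (left+1))).foldl
      (fun l i => if l.getD i "" == " " then l.set i "*" else l) row

-- outer loop of B: for y in range(1, len(conts)-1): conts[y] = fill of conts[y]
def fill_inside_alt (conts : List (List String)) : List (List String) :=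
  (List.range' 1 (conts.length - 2)).foldl
    (fun cs y => cs.set y (fillRowB (cs.getD y []))) conts

-- ===== PRECONDITION & SPEC =====
def Spec_fill_inside (conts : List (List String)) (out : List (List String)) : Prop := out = fill_inside_alt conts
instance (conts : List (List String)) (out : List (List String)) : Decidable (Spec_fill_inside conts out) := by unfold Spec_fill_inside; infer_instance

-- ===== CLAIM (what is proved, stated in full; the proofs are below) =====
def Claim_equal_fill_inside : Prop := ∀ (conts : List (List String)), Dom_fill_inside conts → Spec_fill_inside conts (fill_inside conts)

-- ===== LEMMAS AND PROOFS =====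

lemma fillRowA_go_nostar (suffix : List String) : ∀ (acc : List String) (j : Nat) (lastA : Bool),
    "*" ∉ suffix → fillRowA_go acc j suffix false lastA = acc := by
  induction suffix with
  | nil => intro acc j lastA _; rfl
  | cons x rest ih =>
    intro acc j lastA h
    have hx : x ≠ "*" := fun hx => h (hx ▸ List.mem_cons_self)
    have hr : "*" ∉ rest := fun hr => h (List.mem_cons_of_mem _ hr)
    simpa [fillRowA_go, hx] using ih acc (j+1) false hr

lemma fillRowA_go_pre (pre : List String) : ∀ (suf acc : List String) (j : Nat) (lastA : Bool),
    "*" ∉ pre →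
    fillRowA_go acc j (pre ++ "*" :: suf) false lastA
      = fillRowA_go acc (j + pre.length + 1) suf true true := by
  induction pre with
  | nil =>
    intro suf acc j lastA _
    simp [fillRowA_go]
  | cons x rest ih =>
    intro suf acc j lastA h
    have hx : x ≠ "*" := fun hx => h (hx ▸ List.mem_cons_self)
    have hr : "*" ∉ rest := fun hr => h (List.mem_cons_of_mem _ hr)
    have h2 := ih suf acc (j+1) false hr
    have h3 : j + 1 + rest.length + 1 = j + (x :: rest).length + 1 := by
      simp; omega
    rw [h3] at h2
    simpa [fillRowA_go, hx] using h2

lemma findBoundaryB_mem (row : List String) (idxs : List Nat) :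
    findBoundaryB row idxs = row.length ∨ findBoundaryB row idxs ∈ idxs := by
  induction idxs with
  | nil => left; rfl
  | cons i rest ih =>
    simp only [findBoundaryB]
    by_cases h : (row.getD i "" == "*" && row.getD (i-1) "" != "*") = true
    · rw [if_pos h]; right; exact List.mem_cons_self
    · rw [if_neg h]
      rcases ih with h1 | h1
      · left; exact h1
      · right; exact List.mem_cons_of_mem _ h1

lemma findBoundaryB_ge (row : List String) (j : Nat) (hj : j ≤ row.length) :
    j ≤ findBoundaryB row (List.range' j (row.length - j)) := by
  rcases findBoundaryB_mem row (List.range' j (row.length - j)) with h | h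
  · omega
  · have := (List.mem_range'_1.mp h).1; omega

lemma phaseB (row : List String) : ∀ (suffix : List String) (j : Nat) (acc : List String),
    1 ≤ j → row.drop j = suffix →
    fillRowA_go acc j suffix true (row.getD (j-1) "" == "*")
      = (List.range' j (findBoundaryB row (List.range' j (row.length - j)) - j)).foldl
          (fun l i => if row.getD i "" == " " then l.set i "*" else l) acc := by
  intro suffix
  induction suffix with
  | nil =>
    intro j acc hj hdrop
    have hlen : row.length ≤ j := by
      by_contra h
      have := List.drop_eq_nil_iff.mp hdrop
      omega
    have h0 : row.length - j = 0 := by omega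
    simp [fillRowA_go, h0, findBoundaryB]
  | cons x rest ih =>
    intro j acc hj hdrop
    have hjlt : j < row.length := by
      by_contra h
      rw [List.drop_eq_nil_of_le (by omega)] at hdrop
      simp at hdrop
    have h0 : row[j]? = some x := by
      have h1 : (List.drop j row)[0]? = row[j+0]? := List.getElem?_drop
      rw [hdrop] at h1
      simpa using h1.symm
    have hx : row.getD j "" = x := by
      simp [List.getD_eq_getElem?_getD, h0]
    have hrest : row.drop (j+1) = rest := by
      have h1 : row.drop (j+1) = (row.drop j).drop 1 := by rw [List.drop_drop]
      rw [h1, hdrop]; rfl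
    have hrange : List.range' j (row.length - j) = j :: List.range' (j+1) (row.length - (j+1)) := by
      have h1 : row.length - j = (row.length - (j+1)) + 1 := by omega
      rw [h1, List.range'_succ]
    by_cases hstar : x = "*"
    · subst hstar
      by_cases hlastA : (row.getD (j-1) "" == "*") = true
      · have hb : findBoundaryB row (List.range' j (row.length - j))
            = findBoundaryB row (List.range' (j+1) (row.length - (j+1))) := by
          have hl : row.getD (j-1) "" = "*" := by simpa using hlastA
          rw [hrange]
          simp only [findBoundaryB, hx, hl]
          simp
        have hbge : j + 1 ≤ findBoundaryB row (List.range' (j+1) (row.length - (j+1))) :=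
          findBoundaryB_ge row (j+1) (by omega)
        have hpeel : List.range' j (findBoundaryB row (List.range' (j+1) (row.length - (j+1))) - j)
            = j :: List.range' (j+1) (findBoundaryB row (List.range' (j+1) (row.length - (j+1))) - (j+1)) := by
          have h1 : findBoundaryB row (List.range' (j+1) (row.length - (j+1))) - j
              = (findBoundaryB row (List.range' (j+1) (row.length - (j+1))) - (j+1)) + 1 := by omega
          rw [h1, List.range'_succ]
        rw [hlastA, hb, hpeel]
        simp only [List.foldl_cons]
        have hstep : (row.getD j "" == " ") = false := by rw [hx]; decide
        rw [hstep]
        have ihj := ih (j+1) acc (by omega) hrest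
        have hflag : (row.getD ((j+1)-1) "" == "*") = true := by
          simp only [Nat.add_sub_cancel]; rw [hx]; decide
        rw [hflag] at ihj
        simpa [fillRowA_go] using ihj
      · have hl : ¬ row.getD (j-1) "" = "*" := by simpa using hlastA
        have hb : findBoundaryB row (List.range' j (row.length - j)) = j := by
          have hne : (row.getD (j-1) "" != "*") = true := by simpa using hl
          rw [hrange]
          simp only [findBoundaryB, hx, hne]
          simp
        rw [hb]
        have hcond : (row.getD (j-1) "" == "*") = false := by simpa using hlastA
        rw [hcond]
        simp [fillRowA_go]
    · have hb : findBoundaryB row (List.range' j (row.length - j))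
          = findBoundaryB row (List.range' (j+1) (row.length - (j+1))) := by
        have hne0 : (row.getD j "" == "*") = false := by rw [hx]; simpa using hstar
        rw [hrange]
        simp only [findBoundaryB, hne0]
        simp
      have hbge : j + 1 ≤ findBoundaryB row (List.range' (j+1) (row.length - (j+1))) :=
        findBoundaryB_ge row (j+1) (by omega)
      have hpeel : List.range' j (findBoundaryB row (List.range' (j+1) (row.length - (j+1))) - j)
          = j :: List.range' (j+1) (findBoundaryB row (List.range' (j+1) (row.length - (j+1))) - (j+1)) := by
        have h1 : findBoundaryB row (List.range' (j+1) (row.length - (j+1))) - j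
            = (findBoundaryB row (List.range' (j+1) (row.length - (j+1))) - (j+1)) + 1 := by omega
        rw [h1, List.range'_succ]
      have ihj := ih (j+1) acc (by omega) hrest
      have hflag : (row.getD ((j+1)-1) "" == "*") = false := by
        simp only [Nat.add_sub_cancel]; rw [hx]; simpa using hstar
      rw [hflag] at ihj
      have ihj' := ih (j+1) (acc.set j "*") (by omega) hrest
      rw [hflag] at ihj'
      rw [hb, hpeel]
      simp only [List.foldl_cons]
      by_cases hsp : x = " "
      · have hstep : (row.getD j "" == " ") = true := by rw [hx, hsp]; decide
        rw [hstep]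
        simpa [fillRowA_go, hstar, hsp] using ihj'
      · have hstep : (row.getD j "" == " ") = false := by rw [hx]; simpa using hsp
        rw [hstep]
        simpa [fillRowA_go, hstar, hsp] using ihj

lemma fill_foldl_row (row : List String) : ∀ (k j : Nat) (l : List String),
    (∀ i, j ≤ i → l.getD i "" = row.getD i "") →
    (List.range' j k).foldl (fun l i => if l.getD i "" == " " then l.set i "*" else l) l
      = (List.range' j k).foldl (fun l i => if row.getD i "" == " " then l.set i "*" else l) l := by
  intro k
  induction k with
  | zero => intro j l _; rfl
  | succ k ih =>
    intro j l h
    rw [List.range'_succ]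
    simp only [List.foldl_cons]
    rw [h j le_rfl]
    by_cases hsp : (row.getD j "" == " ") = true
    · rw [if_pos hsp]
      apply ih
      intro i hi
      rw [List.getD_eq_getElem?_getD, List.getD_eq_getElem?_getD,
        List.getElem?_set_ne (by omega)]
      rw [← List.getD_eq_getElem?_getD, ← List.getD_eq_getElem?_getD]
      exact h i (by omega)
    · rw [if_neg hsp]
      exact ih (j+1) l (fun i hi => h i (by omega))

lemma row_eq (row : List String) :
    fillRowA_go row 0 row false true = fillRowB row := by
  cases hidx : PySem.List.index? row "*" with
  | none =>
    have hmem : "*" ∉ row := (PySem.List.index?_eq_none_iff row "*").mp hidx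
    rw [fillRowB, hidx]
    exact fillRowA_go_nostar row row 0 true hmem
  | some left =>
    obtain ⟨pre, suf, hrow, hlen, hpre⟩ := (PySem.List.index?_eq_some_iff row "*" left).mp hidx
    have hleft : row.getD left "" = "*" := by
      rw [List.getD_eq_getElem?_getD]
      subst hlen
      rw [hrow]
      simp
    have hdrop : row.drop (left+1) = suf := by
      subst hlen
      rw [hrow]
      have h1 : pre ++ "*" :: suf = (pre ++ ["*"]) ++ suf := by simp
      have h2 : pre.length + 1 = (pre ++ ["*"]).length := by simp
      rw [h1, h2, List.drop_left]
    have hA : fillRowA_go row 0 row false true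
        = fillRowA_go row (left+1) suf true true := by
      rw [hrow, fillRowA_go_pre pre suf _ 0 true hpre]
      subst hlen
      norm_num
    have hflag : (row.getD ((left+1)-1) "" == "*") = true := by
      simp only [Nat.add_sub_cancel]
      rw [hleft]; decide
    have hphase := phaseB row suf (left+1) row (by omega) hdrop
    rw [hflag] at hphase
    rw [hA, hphase, fillRowB, hidx]
    exact (fill_foldl_row row _ (left+1) row (fun i _ => rfl)).symm

lemma getElem?_fill_inside_go (n : Nat) : ∀ (rows : List (List String)) (j i : Nat),
    (fill_inside_go n j rows)[i]?
      = (rows[i]?).map (fun row =>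
          if j + i == 0 || j + i == n - 1 then row else fillRowA_go row 0 row false true) := by
  intro rows
  induction rows with
  | nil => intro j i; simp [fill_inside_go]
  | cons r rest ih =>
    intro j i
    cases i with
    | zero => simp [fill_inside_go]
    | succ i =>
      simp only [fill_inside_go, List.getElem?_cons_succ]
      rw [ih (j+1) i]
      simp only [show j + 1 + i = j + (i + 1) from by omega]

lemma getElem?_foldl_set : ∀ (k a : Nat) (cs : List (List String)) (i : Nat),
    ((List.range' a k).foldl (fun cs y => cs.set y (fillRowB (cs.getD y []))) cs)[i]?
      = if a ≤ i ∧ i < a + k then (cs[i]?).map fillRowB else cs[i]? := by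
  intro k
  induction k with
  | zero => intro a cs i; rw [if_neg (by omega)]; rfl
  | succ k ih =>
    intro a cs i
    rw [List.range'_succ]
    simp only [List.foldl_cons]
    rw [ih (a+1) _ i]
    by_cases hia : i = a
    · subst hia
      rw [if_neg (by omega), if_pos (by omega)]
      by_cases hlt : i < cs.length
      · rw [List.getElem?_set_self (by simpa using hlt)]
        simp [List.getD_eq_getElem?_getD, List.getElem?_eq_getElem hlt]
      · rw [List.getElem?_eq_none (l := cs.set i (fillRowB (cs.getD i []))) (by simp; omega),
            List.getElem?_eq_none (l := cs) (by omega)]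
        rfl
    · rw [List.getElem?_set_ne (fun h => hia h.symm)]
      by_cases h1 : a + 1 ≤ i ∧ i < a + 1 + k
      · rw [if_pos h1, if_pos (by omega)]
      · rw [if_neg h1, if_neg (by omega)]

theorem main (conts : List (List String)) :
    fill_inside_go conts.length 0 conts
      = (List.range' 1 (conts.length - 2)).foldl
          (fun cs y => cs.set y (fillRowB (cs.getD y []))) conts := by
  apply List.ext_getElem?
  intro i
  rw [getElem?_fill_inside_go, getElem?_foldl_set]
  by_cases hi : i < conts.length
  · by_cases hb : 1 ≤ i ∧ i < 1 + (conts.length - 2)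
    · rw [if_pos hb]
      have hc : (0 + i == 0 || 0 + i == conts.length - 1) = false := by
        simp; omega
      rw [hc]
      congr 1
      funext row
      exact row_eq row
    · rw [if_neg hb]
      have hc : (0 + i == 0 || 0 + i == conts.length - 1) = true := by
        simp; omega
      rw [hc]
      simp
  · rw [List.getElem?_eq_none (by omega)]
    rw [if_neg (by omega)]
    rfl

-- ===== VERDICT (by name: the statement is the Claim_ definition above) =====
theorem fill_inside_spec : Claim_equal_fill_inside := by
  intro conts _
  unfold Spec_fill_inside fill_inside fill_inside_alt
  exact main conts
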